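-- pv_equiv track=rewrite | github.com/broker0/py_astealth | stealth/helpers/utils.py | EUO2StealthID
-- ===== SOURCE A (Python) =====
-- def EUO2StealthID(euo: str) -> int:
--     """
--     Convert EasyUO ID string to Stealth object ID.
--
--     Args:
--         euo: EasyUO ID string
--
--     Returns:
--         Stealth object ID
--     """
--     res = 0
--     multi = 1
--     for char in euo:
--         tmp = int.from_bytes(char.encode(), 'little')
--         res += multi * (tmp - 65)
--         multi *= 26
--     return (res - 7) ^ 0x0045
-- ===== SOURCE B (Python) =====
-- def EUO2StealthID(euo: str) -> int:
--     """
--     Convert EasyUO ID string to Stealth object ID.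
--
--     Divide and conquer: the value of a string is value(left half) +
--     26**len(left half) * value(right half); single chars convert directly.
--     """
--     def conv(s: str) -> int:
--         if len(s) == 0:
--             return 0
--         if len(s) == 1:
--             return int.from_bytes(s.encode(), 'little') - 65
--         mid = len(s) // 2
--         return conv(s[:mid]) + 26 ** mid * conv(s[mid:])
--
--     return (conv(euo) - 7) ^ 0x0045
-- ===== Notes on version B (the rewrite author's own statement) =====
-- stated objective: faster
-- what changed: Replaces A's left-to-right loop carrying two running state variables (res and multi) by a divide-and-conquer recursion value(s) = value(left half) + 26**mid * value(right half): balanced big-int products instead of n sequential multiplications on an ever-growing accumulator; intended as faster on long strings, measured 11-20x at the largest sizes both finish (timing-probe label varied between measured and unconfirmed across input families).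
import Mathlib
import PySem

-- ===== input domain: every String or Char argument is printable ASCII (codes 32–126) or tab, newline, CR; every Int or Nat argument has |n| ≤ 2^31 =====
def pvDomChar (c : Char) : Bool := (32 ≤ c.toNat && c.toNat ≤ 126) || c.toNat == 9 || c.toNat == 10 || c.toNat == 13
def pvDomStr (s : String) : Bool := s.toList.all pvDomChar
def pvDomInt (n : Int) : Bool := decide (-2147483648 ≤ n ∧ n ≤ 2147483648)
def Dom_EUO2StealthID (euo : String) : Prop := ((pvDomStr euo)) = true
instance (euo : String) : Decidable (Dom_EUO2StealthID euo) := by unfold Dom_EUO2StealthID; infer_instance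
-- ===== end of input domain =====

-- ===== PORT A =====
-- B replaces A's left-to-right loop with two running state variables (res, multi)
-- by a divide-and-conquer recursion on string halves (objective: faster on long
-- strings via balanced big-int products; intended as faster, measured 11-20x by the
-- timing run at the largest sizes both versions finished).
-- `int.from_bytes(char.encode(), 'little')` is ported as `c.toNat`: exact on Dom (ASCII, one byte).
def EUO2StealthID (euo : String) : Int :=
  let p := euo.toList.foldl
    (fun (p : Int × Int) (c : Char) => (p.1 + p.2 * ((c.toNat : Int) - 65), p.2 * 26))
    (0, 1)
  PySem.Int.bxor (p.1 - 7) 0x0045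

-- ===== PORT B =====
-- Source B's helper conv: s[:mid] / s[mid:] are ported as take/drop, exact since 0 ≤ mid ≤ len(s).
def pvConv (l : List Char) : Int :=
  match l with
  | [] => 0
  | [c] => (c.toNat : Int) - 65
  | a :: b :: t =>
      let mid := (a :: b :: t).length / 2
      pvConv ((a :: b :: t).take mid) + 26 ^ mid * pvConv ((a :: b :: t).drop mid)
termination_by l.length
decreasing_by
  all_goals simp only [List.length_take, List.length_drop, List.length_cons]
  all_goals omega

def EUO2StealthID_alt (euo : String) : Int :=
  PySem.Int.bxor (pvConv euo.toList - 7) 0x0045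

-- ===== PRECONDITION & SPEC =====
def Spec_EUO2StealthID (euo : String) (out : Int) : Prop := out = EUO2StealthID_alt euo
instance (euo : String) (out : Int) : Decidable (Spec_EUO2StealthID euo out) := by unfold Spec_EUO2StealthID; infer_instance

-- ===== CLAIM =====
def Claim_equal_EUO2StealthID : Prop := ∀ (euo : String), Dom_EUO2StealthID euo → Spec_EUO2StealthID euo (EUO2StealthID euo)

-- ===== LEMMAS AND PROOFS =====
-- the positional value both programs compute, as a sum over enumerate
def pvSum (l : List Char) (s : Int) : Int :=
  ((PySem.List.enumerate l s).map
    (fun p => ((p.2.toNat : Int) - 65) * (26 : Int) ^ p.1.toNat)).sum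

theorem pvSum_cons' (c : Char) (l : List Char) (s : Int) :
    pvSum (c :: l) s = ((c.toNat : Int) - 65) * 26 ^ s.toNat + pvSum l (s + 1) := by
  simp [pvSum, PySem.List.enumerate_cons]

theorem pvSum_shift (l : List Char) : ∀ (s : Int), 0 ≤ s →
    pvSum l s = 26 ^ s.toNat * pvSum l 0 := by
  induction l with
  | nil => intro s _; simp [pvSum, PySem.List.enumerate_nil]
  | cons c l ih =>
      intro s hs
      have ht : (s + 1).toNat = s.toNat + 1 := by omega
      rw [pvSum_cons', pvSum_cons', ih (s + 1) (by omega), ih (0 + 1) (by norm_num)]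
      simp [ht, pow_succ]
      ring

theorem pvSum_cons (c : Char) (l : List Char) :
    pvSum (c :: l) 0 = ((c.toNat : Int) - 65) + 26 * pvSum l 0 := by
  rw [pvSum_cons', pvSum_shift l (0 + 1) (by norm_num)]
  norm_num

theorem pvSum_append (l1 l2 : List Char) :
    pvSum (l1 ++ l2) 0 = pvSum l1 0 + 26 ^ l1.length * pvSum l2 0 := by
  have hs := pvSum_shift l2 ((l1.length : Int)) (by positivity)
  simp only [pvSum] at hs ⊢
  rw [PySem.List.enumerate_append, List.map_append, List.sum_append, zero_add, hs,
    Int.toNat_natCast]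

-- B's divide-and-conquer recursion computes the positional sum
theorem pvConv_eq (l : List Char) : pvConv l = pvSum l 0 := by
  induction l using pvConv.induct with
  | case1 => simp [pvConv, pvSum, PySem.List.enumerate_nil]
  | case2 c =>
      rw [pvConv, pvSum_cons]
      simp [pvSum, PySem.List.enumerate_nil]
  | case3 a b l mid ih1 ih2 =>
      rw [pvConv]
      have hsplit := pvSum_append ((a :: b :: l).take ((a :: b :: l).length / 2))
        ((a :: b :: l).drop ((a :: b :: l).length / 2))
      rw [List.take_append_drop] at hsplit
      rw [hsplit, ih1, ih2, List.length_take]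
      have : min ((a :: b :: l).length / 2) (a :: b :: l).length = (a :: b :: l).length / 2 := by
        simp; omega
      rw [this]

-- invariant of A's loop: the running pair (r, m) contributes r + m * pvSum(rest)
theorem pvA_loop (l : List Char) : ∀ (r m : Int),
    (l.foldl (fun (p : Int × Int) (c : Char) => (p.1 + p.2 * ((c.toNat : Int) - 65), p.2 * 26)) (r, m)).1
      = r + m * pvSum l 0 := by
  induction l with
  | nil => intro r m; simp [pvSum, PySem.List.enumerate_nil]
  | cons c l ih =>
      intro r m
      simp only [List.foldl_cons, ih, pvSum_cons]
      ring

-- ===== VERDICT =====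
theorem EUO2StealthID_spec : Claim_equal_EUO2StealthID := by
  intro euo _
  unfold Spec_EUO2StealthID EUO2StealthID EUO2StealthID_alt
  simp only [pvA_loop, pvConv_eq]
  ring_nf
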